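-- pv_equiv track=rewrite | github.com/StoianBodurov/Python-101-Forever | IBAN_formatter.py | iban_formatter
-- ===== SOURCE A (Python) =====
-- def iban_formatter(iban):
--     result = []
--     count = 0
--
--     for el in iban:
--         if el.isspace():
--             continue
--         count += 1
--         result.append(el)
--         if count == 4:
--             result.append(" ")
--             count = 0
--     return ''.join(result)
-- ===== SOURCE B (Python) =====
-- import re
--
-- def iban_formatter(iban):
--     cleaned = ''.join(c for c in iban if not c.isspace())
--     return re.sub(r'(.{4})', r'\1 ', cleaned)
-- ===== Notes on version B (the rewrite author's own statement) =====
-- stated objective: idiomatic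
-- what changed: Replaces the explicit per-character loop with a mod-4 counter by a two-phase pipeline: filter out whitespace into a cleaned string, then a single regex substitution that appends a space after every complete group of four characters.
import Mathlib
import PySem

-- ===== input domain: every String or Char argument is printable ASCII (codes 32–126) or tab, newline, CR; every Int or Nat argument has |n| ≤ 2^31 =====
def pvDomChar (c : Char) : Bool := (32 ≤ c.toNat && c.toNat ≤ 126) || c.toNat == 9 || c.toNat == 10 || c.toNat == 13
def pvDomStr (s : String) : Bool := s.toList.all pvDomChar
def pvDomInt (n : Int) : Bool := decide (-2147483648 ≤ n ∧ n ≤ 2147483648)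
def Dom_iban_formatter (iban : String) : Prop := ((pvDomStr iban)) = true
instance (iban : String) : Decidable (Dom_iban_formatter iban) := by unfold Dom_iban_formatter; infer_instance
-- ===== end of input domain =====

-- B replaces A's counter loop by filter-then-regex-substitution (idiomatic decomposition); same O(n) cost.

-- ===== PORT A =====
-- loop state: (result, count); whitespace is skipped, a space is appended after every 4th kept char
def iban_formatter (iban : String) : String :=
  let st := iban.toList.foldl (fun (st : List Char × Int) el =>
    if PySem.Chars.isspace el then st
    else
      let count := st.2 + 1
      let result := st.1 ++ [el]
      if count == 4 then (result ++ [' '], 0) else (result, count)) ([], 0)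
  String.ofList st.1

-- ===== PORT B =====
-- re.sub(r'(.{4})', r'\1 ', s): each run of 4 chars is replaced by itself followed by a space
def pvGroup4 : List Char → List Char
  | a :: b :: c :: d :: rest => a :: b :: c :: d :: ' ' :: pvGroup4 rest
  | xs => xs

def iban_formatter_alt (iban : String) : String :=
  String.ofList (pvGroup4 (iban.toList.filter (fun c => !PySem.Chars.isspace c)))

-- ===== PRECONDITION & SPEC =====
def Spec_iban_formatter (iban : String) (out : String) : Prop := out = iban_formatter_alt iban
instance (iban : String) (out : String) : Decidable (Spec_iban_formatter iban out) := by unfold Spec_iban_formatter; infer_instance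

-- ===== CLAIM (what is proved, stated in full; the proofs are below) =====
def Claim_equal_iban_formatter : Prop := ∀ (iban : String), Dom_iban_formatter iban → Spec_iban_formatter iban (iban_formatter iban)

-- ===== LEMMAS AND PROOFS =====

-- A's non-skip step, as a function over the filtered list
def pvStep (st : List Char × Int) (el : Char) : List Char × Int :=
  let count := st.2 + 1
  let result := st.1 ++ [el]
  if count == 4 then (result ++ [' '], 0) else (result, count)

theorem pvFoldl_filter_step (l : List Char) (st : List Char × Int) :
    l.foldl (fun (st : List Char × Int) el =>
      if PySem.Chars.isspace el then st
      else
        let count := st.2 + 1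
        let result := st.1 ++ [el]
        if count == 4 then (result ++ [' '], 0) else (result, count)) st
    = (l.filter (fun c => !PySem.Chars.isspace c)).foldl pvStep st := by
  induction l generalizing st with
  | nil => rfl
  | cons a t ih =>
    by_cases h : PySem.Chars.isspace a
    · simp only [List.foldl_cons, List.filter_cons, h, Bool.not_true, if_true]
      exact ih st
    · have h' : PySem.Chars.isspace a = false := by simpa using h
      simp only [List.foldl_cons, List.filter_cons, h', Bool.not_false, if_true,
        Bool.false_eq_true, if_false]
      exact ih (pvStep st a)

theorem pvFold_group : ∀ (l acc : List Char),
    (List.foldl pvStep (acc, (0 : Int)) l).1 = acc ++ pvGroup4 l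
  | [], acc => by simp [pvGroup4]
  | [a], acc => by simp [List.foldl, pvStep, pvGroup4]
  | [a, b], acc => by simp [List.foldl, pvStep, pvGroup4]
  | [a, b, c], acc => by simp [List.foldl, pvStep, pvGroup4]
  | a :: b :: c :: d :: rest, acc => by
    have ih := pvFold_group rest (acc ++ [a, b, c, d, ' '])
    simp [List.foldl, pvStep] at ih ⊢
    simp [pvGroup4, ih]

-- ===== VERDICT (by name: the statement is the Claim_ definition above) =====
theorem iban_formatter_spec : Claim_equal_iban_formatter := by
  intro iban _
  unfold Spec_iban_formatter iban_formatter iban_formatter_alt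
  rw [pvFoldl_filter_step]
  exact congrArg String.ofList (by rw [pvFold_group]; simp)
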